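-- pv_equiv track=rewrite | github.com/CobSammich/aoc | aoc2025/day06/python.py | part1
-- ===== SOURCE A (Python) =====
-- from dataclasses import dataclass
-- from enum import Enum
--
-- class Operation(Enum):
--     MULTIPLY = "*"
--     ADD = "+"
--
-- @dataclass
-- class Problem:
--     numbers: list[int]
--     operation: Operation
--
--     def solve(self) -> int:
--         if self.operation == Operation.ADD:
--             return sum(self.numbers)
--         elif self.operation == Operation.MULTIPLY:
--             answer = 1
--             for val in self.numbers:
--                 answer *= val
--             return answer
--         else:
--             raise ValueError("")
--
-- def part1(data):
--     num_problems = len(data[0])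
--     answer = 0
--     for i in range(num_problems):
--         curr_vals = [int(arr[i]) for arr in data[:-1]]
--         problem = Problem(curr_vals, Operation(data[-1][i]))
--         answer += problem.solve()
--     return answer
-- ===== SOURCE B (Python) =====
-- def part1(data):
--     last = data[-1]
--     is_add = []
--     for i in range(len(data[0])):
--         op = last[i]
--         if op != "+" and op != "*":
--             raise ValueError(f"{op!r} is not a valid Operation")
--         is_add.append(op == "+")
--     acc = [0 if add else 1 for add in is_add]
--     for arr in data[:-1]:
--         acc = [a + int(v) if add else a * int(v)
--                for a, add, v in zip(acc, is_add, arr)]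
--     return sum(acc)
-- ===== Notes on version B (the rewrite author's own statement) =====
-- stated objective: alternative
-- what changed: B drops the per-column Problem dataclass/enum reduction and instead makes a single row-major pass, maintaining a per-column accumulator vector (initialised 0 for '+', 1 for '*') that each row updates via zip, then sums the vector.
import Mathlib
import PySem

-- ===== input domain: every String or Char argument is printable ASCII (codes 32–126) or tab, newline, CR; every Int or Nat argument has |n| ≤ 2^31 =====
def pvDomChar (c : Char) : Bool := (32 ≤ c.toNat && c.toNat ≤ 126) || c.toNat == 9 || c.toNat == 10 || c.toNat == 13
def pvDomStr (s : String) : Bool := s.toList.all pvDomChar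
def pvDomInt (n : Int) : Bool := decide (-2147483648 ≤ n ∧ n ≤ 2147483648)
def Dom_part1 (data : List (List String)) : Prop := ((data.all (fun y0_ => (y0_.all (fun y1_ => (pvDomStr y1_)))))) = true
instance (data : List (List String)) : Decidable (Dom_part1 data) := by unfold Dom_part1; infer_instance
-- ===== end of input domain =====

-- B replaces A's per-column gather-and-reduce (dataclass/enum Problem per column) by a single
-- row-major pass maintaining a per-column accumulator vector (objective: alternative decomposition).

-- ===== PORT A =====
-- Problem.solve: sum for '+', running product for '*'; its final 'raise ValueError' branch
-- (and every IndexError/ValueError of A) is outside Pre_part1, ported as a default value.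
def pvSolve (nums : List Int) (op : String) : Int :=
  if op == "+" then nums.foldl (· + ·) 0
  else if op == "*" then nums.foldl (· * ·) 1
  else 0

def part1 (data : List (List String)) : Int :=
  let numProblems := ((PySem.List.pyGet? data 0).getD []).length
  (PySem.List.pyRange 0 numProblems 1).foldl
    (fun answer i =>
      let currVals := (PySem.List.slice data none (some (-1))).map
        (fun arr => (PySem.Int.ofStr? ((PySem.List.pyGet? arr i).getD "")).getD 0)
      answer + pvSolve currVals
        ((PySem.List.pyGet? ((PySem.List.pyGet? data (-1)).getD []) i).getD ""))
    0

-- ===== PORT B =====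
-- one accumulator update of Source B: the zip(acc, is_add, arr) comprehension
def pvStep (isAdd : List Bool) (acc : List Int) (arr : List String) : List Int :=
  (acc.zip (isAdd.zip arr)).map
    (fun p => if p.2.1 then p.1 + (PySem.Int.ofStr? p.2.2).getD 0
              else p.1 * (PySem.Int.ofStr? p.2.2).getD 0)

def part1_alt (data : List (List String)) : Int :=
  let last := (PySem.List.pyGet? data (-1)).getD []
  let isAdd := (PySem.List.pyRange 0 (((PySem.List.pyGet? data 0).getD []).length) 1).map
    (fun i => ((PySem.List.pyGet? last i).getD "") == "+")
  let acc0 := isAdd.map (fun add => if add then (0:Int) else 1)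
  ((PySem.List.slice data none (some (-1))).foldl (pvStep isAdd) acc0).foldl (· + ·) 0

-- ===== PRECONDITION & SPEC =====
-- Pre_part1 is exactly where Python A returns: data nonempty (else IndexError), every row of
-- data[:-1] has ≥ len(data[0]) entries whose first len(data[0]) columns parse as int (else
-- IndexError/ValueError), and the last row has ≥ len(data[0]) entries, each '+' or '*'
-- (else IndexError / Operation's ValueError).
def Pre_part1 (data : List (List String)) : Prop :=
  data ≠ [] ∧
  (∀ arr ∈ data.dropLast, (data.headD []).length ≤ arr.length ∧
      ∀ s ∈ arr.take (data.headD []).length, (PySem.Int.ofStr? s).isSome = true) ∧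
  (data.headD []).length ≤ (data.getLastD []).length ∧
  (∀ s ∈ (data.getLastD []).take (data.headD []).length, s = "+" ∨ s = "*")
instance (data : List (List String)) : Decidable (Pre_part1 data) := by unfold Pre_part1; infer_instance

def pvWitness_part1 : List (List String) := [["2", "3"], ["4", "5"], ["+", "*"]]

def Spec_part1 (data : List (List String)) (out : Int) : Prop := out = part1_alt data
instance (data : List (List String)) (out : Int) : Decidable (Spec_part1 data out) := by unfold Spec_part1; infer_instance

-- ===== CLAIM (what is proved, stated in full; the proofs are below) =====
def Claim_equal_part1 : Prop := ∀ (data : List (List String)), Dom_part1 data → Pre_part1 data → Spec_part1 data (part1 data)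

-- ===== LEMMAS AND PROOFS =====

theorem list_eq_map_range_getD (l : List Int) :
    (List.range l.length).map (fun j => l.getD j 0) = l := by
  apply List.ext_getElem
  · simp
  · intro i h1 h2
    simp [List.getElem?_eq_getElem h2]

theorem length_pvStep (isAdd : List Bool) (acc : List Int) (arr : List String)
    (h1 : acc.length = isAdd.length) (h2 : isAdd.length ≤ arr.length) :
    (pvStep isAdd acc arr).length = isAdd.length := by
  simp [pvStep]; omega

theorem getD_pvStep (isAdd : List Bool) (acc : List Int) (arr : List String)
    (h1 : acc.length = isAdd.length) (h2 : isAdd.length ≤ arr.length)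
    (j : Nat) (hj : j < isAdd.length) :
    (pvStep isAdd acc arr).getD j 0 =
      (if isAdd.getD j false then (acc.getD j 0) + (PySem.Int.ofStr? (arr.getD j "")).getD 0
       else (acc.getD j 0) * (PySem.Int.ofStr? (arr.getD j "")).getD 0) := by
  have hl := length_pvStep isAdd acc arr h1 h2
  rw [List.getD_eq_getElem _ _ (by omega : j < (pvStep isAdd acc arr).length)]
  simp only [pvStep, List.getElem_map, List.getElem_zip]
  rw [List.getD_eq_getElem acc _ (by omega), List.getD_eq_getElem isAdd _ hj,
      List.getD_eq_getElem arr _ (by omega)]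

-- the accumulator after folding all rows, characterised column by column
theorem foldl_pvStep (isAdd : List Bool) (body : List (List String)) :
    ∀ acc : List Int, acc.length = isAdd.length →
      (∀ arr ∈ body, isAdd.length ≤ arr.length) →
      body.foldl (pvStep isAdd) acc =
        (List.range isAdd.length).map (fun j =>
          body.foldl (fun a arr =>
            if isAdd.getD j false then a + (PySem.Int.ofStr? (arr.getD j "")).getD 0
            else a * (PySem.Int.ofStr? (arr.getD j "")).getD 0) (acc.getD j 0)) := by
  induction body with
  | nil =>
      intro acc h1 _
      simpa [← h1] using (list_eq_map_range_getD acc).symm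
  | cons arr rest ih =>
      intro acc h1 h2
      have harr : isAdd.length ≤ arr.length := h2 arr (by simp)
      have hlen := length_pvStep isAdd acc arr h1 harr
      rw [List.foldl_cons, ih (pvStep isAdd acc arr) hlen (fun a ha => h2 a (by simp [ha]))]
      apply List.map_congr_left
      intro j hj
      rw [List.mem_range] at hj
      rw [getD_pvStep isAdd acc arr h1 harr j hj, List.foldl_cons]

theorem pyRange_cast (n : Nat) :
    PySem.List.pyRange 0 (n:Int) 1 = (List.range n).map (Nat.cast : Nat → Int) := by
  rw [PySem.List.pyRange_one]
  simp

-- A's column-i reduction equals B's column-i running combination, for every i < n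
theorem pvMain (body : List (List String)) (last : List String) (n : Nat)
    (hb : ∀ arr ∈ body, n ≤ arr.length)
    (hl : n ≤ last.length)
    (hop : ∀ s ∈ last.take n, s = "+" ∨ s = "*") :
    (PySem.List.pyRange 0 (n:Int) 1).foldl
      (fun answer i => answer +
        pvSolve (body.map (fun arr => (PySem.Int.ofStr? ((PySem.List.pyGet? arr i).getD "")).getD 0))
          ((PySem.List.pyGet? last i).getD "")) 0
    = (body.foldl
        (pvStep ((PySem.List.pyRange 0 (n:Int) 1).map (fun i => ((PySem.List.pyGet? last i).getD "") == "+")))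
        (((PySem.List.pyRange 0 (n:Int) 1).map (fun i => ((PySem.List.pyGet? last i).getD "") == "+")).map
          (fun add => if add then (0:Int) else 1))).foldl (· + ·) 0 := by
  rw [pyRange_cast]
  simp only [List.map_map, Function.comp_def, PySem.List.pyGet?_natCast]
  set isAdd : List Bool := (List.range n).map (fun k => (last[(k:Nat)]?.getD "" == "+")) with hisAdd
  have hlenAdd : isAdd.length = n := by simp [hisAdd]
  have hgetAdd : ∀ j : Nat, j < n → isAdd.getD j false = (last[j]?.getD "" == "+") := by
    intro j hj
    rw [List.getD_eq_getElem _ _ (by omega : j < isAdd.length)]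
    simp [hisAdd]
  have hstep := foldl_pvStep isAdd body
      ((List.range n).map (fun x => if (last[x]?.getD "" == "+") = true then (0:Int) else 1))
      (by simp [hlenAdd]) (by rw [hlenAdd]; exact hb)
  rw [hstep, hlenAdd, List.foldl_map, List.foldl_map]
  apply PySem.List.foldl_congr_mem
  intro acc k hk
  rw [List.mem_range] at hk
  simp only [PySem.List.pyGet?_natCast]
  congr 1
  have hjl : k < last.length := by omega
  have hjt : k < (last.take n).length := by simp; omega
  have hmem : last[k] ∈ last.take n := by
    have hm := List.getElem_mem hjt
    rwa [List.getElem_take] at hm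
  have hval : last[k]? = some last[k] := List.getElem?_eq_getElem hjl
  rw [hgetAdd k hk, hval]
  have hacc0j : ((List.range n).map (fun x => if (last[x]?.getD "" == "+") = true then (0:Int) else 1)).getD k 0
      = if (last[k]?.getD "" == "+") = true then (0:Int) else 1 := by
    rw [List.getD_eq_getElem _ _ (by simp; omega)]
    simp
  rw [hacc0j, hval]
  rcases hop last[k] hmem with h | h <;>
    simp [h, pvSolve, List.getD_eq_getElem?_getD, List.foldl_map]

-- ===== VERDICT (by name: the statement is the Claim_ definition above) =====
theorem part1_spec : Claim_equal_part1 := by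
  intro data _ hpre
  obtain ⟨hne, hbody, hlast, hops⟩ := hpre
  unfold Spec_part1 part1 part1_alt
  have h0 : (PySem.List.pyGet? data 0).getD [] = data.headD [] := by
    cases data with
    | nil => exact absurd rfl hne
    | cons d t => simp
  have hlast' : (PySem.List.pyGet? data (-1)).getD [] = data.getLastD [] := by
    rw [PySem.List.pyGet?_neg_one]
    exact (List.getLastD_eq_getLast?).symm
  rw [PySem.List.slice_to_neg_one, h0, hlast']
  exact pvMain data.dropLast (data.getLastD []) (data.headD []).length
    (fun arr h => (hbody arr h).1) hlast hops
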